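-- pv_equiv track=rewrite | github.com/willdelphia/pygomacro | macropad integration.py | does_move_capture
-- ===== SOURCE A (Python) =====
-- cols = 3
--
-- rows = 4
--
-- def is_color(x,y,color, board):
--     if board[y][x] == color:
--         return True
--     else:
--       return False
--
-- def get_neighbors(x, y, color, board):
--     neighbors = []
--     # Above
--     if y > 0:
--         if is_color(x, y - 1, color, board):
--             neighbors.append((x, y - 1))
--     # Below
--     if y < rows - 1:
--         if is_color(x, y + 1, color, board):
--             neighbors.append((x, y + 1))
--     # Left
--     if x > 0:
--         if is_color(x - 1, y, color, board):
--             neighbors.append((x - 1, y))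
--     # Right
--     if x < cols - 1:
--         if is_color(x + 1, y, color, board):
--             neighbors.append((x + 1, y))
--     return neighbors
--
-- def get_chain_and_liberites(x, y, color, board):
--     chain = set()  # Set to store the coordinates of stones in the chain
--     visited = set()  # Set to keep track of visited intersections
--
--     def dfs_chain(xx, yy):
--         # Check if the current intersection is of the given color and not visited yet
--         if (xx, yy) not in visited and is_color(xx, yy, color, board) or (xx == x and yy == y):
--             visited.add((xx, yy))
--             chain.add((xx, yy))
--             neighbors = get_neighbors(xx, yy, color, board)
--             # Recursively call dfs_chain for neighboring intersections
--             for nx, ny in neighbors: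
--                 dfs_chain(nx, ny)
--
--     dfs_chain(x, y)
--
--     liberties = set()  # Set to store the liberties of the chain
--
--     # For each stone in the chain, find its neighboring intersections
--
--     for cx, cy in chain:
--         neighbors = get_neighbors(cx, cy, 0, board)  # Find liberties (color = 0) around the stone
--         liberties.update(neighbors)
--
--     return {"liberties": list(liberties), "chain": list(chain)}
--
-- def does_move_capture(x, y, color, board):
--     captures = False
--
--     #only accept 1 or 2 as color for this function
--     if color == 0:
--         return False
--
--     #find neighbors of opposite color
--     opposite_color = 2 if color == 1 else 1
--     oppositeNeighbors = get_neighbors(x,y,opposite_color, board)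
--
--     for neighbor in oppositeNeighbors:
--         if len(get_chain_and_liberites(neighbor[0], neighbor[1], opposite_color, board)['liberties']) == 1:
--             captures = True
--     return captures
-- ===== SOURCE B (Python) =====
-- cols = 3
--
-- rows = 4
--
--
-- def does_move_capture(x, y, color, board):
--     # Iterative rounds-based flood fill instead of A's per-stone recursive DFS.
--     if color == 0:
--         return False
--     opp = 2 if color == 1 else 1
--
--     def nbrs_of(a, b, col):
--         out = []
--         if b > 0 and board[b - 1][a] == col:
--             out.append((a, b - 1))
--         if b < rows - 1 and board[b + 1][a] == col:
--             out.append((a, b + 1))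
--         if a > 0 and board[b][a - 1] == col:
--             out.append((a - 1, b))
--         if a < cols - 1 and board[b][a + 1] == col:
--             out.append((a + 1, b))
--         return out
--
--     for s in nbrs_of(x, y, opp):
--         # connected chain of s: saturate by bounded expansion rounds
--         chain = {s}
--         for _ in range(cols * rows):
--             for c in list(chain):
--                 chain |= set(nbrs_of(c[0], c[1], opp))
--         libs = {n for c in chain for n in nbrs_of(c[0], c[1], 0)}
--         if len(libs) == 1:
--             return True
--     return False
-- ===== Notes on version B (the rewrite author's own statement) =====
-- stated objective: alternative
-- what changed: Replaces A's per-stone recursive DFS (closure-based dfs_chain with visited/chain sets plus a dict-returning chain-and-liberties helper) by an iterative rounds-based flood fill that saturates each chain by bounded expansion rounds, collects liberties with a set comprehension, and returns True early; the neighbour bounds/colour guards are kept identical.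
-- outside the precondition, e.g. on does_move_capture(-1, 1, 1, [[0, 0, 2], [0, 0, 1], [0, 0, 0], [0, 0, 0]]): A returns True, B returns True
import Mathlib
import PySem

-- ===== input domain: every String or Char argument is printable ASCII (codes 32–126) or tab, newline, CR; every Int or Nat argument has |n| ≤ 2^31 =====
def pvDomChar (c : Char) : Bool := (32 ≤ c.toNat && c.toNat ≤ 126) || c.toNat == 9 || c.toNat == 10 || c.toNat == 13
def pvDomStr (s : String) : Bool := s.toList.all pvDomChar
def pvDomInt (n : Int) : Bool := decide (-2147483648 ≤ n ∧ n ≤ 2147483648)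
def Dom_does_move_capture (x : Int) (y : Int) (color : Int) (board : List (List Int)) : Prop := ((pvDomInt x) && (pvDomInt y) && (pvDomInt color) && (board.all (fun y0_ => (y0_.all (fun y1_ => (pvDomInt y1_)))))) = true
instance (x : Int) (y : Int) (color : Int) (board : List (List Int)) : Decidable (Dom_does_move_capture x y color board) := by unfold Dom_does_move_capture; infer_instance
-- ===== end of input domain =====

-- B replaces A's per-stone recursive DFS with an iterative rounds-based flood-fill (bounded
-- saturation) and a liberty set comprehension with an early return: a different decomposition,
-- same return value on every input admitted by Pre_ (no speed claim).

-- ===== PORT A =====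
-- board[y][x]; the default is never reached on inputs satisfying Pre_does_move_capture
def pvCell (board : List (List Int)) (y x : Int) : Int :=
  PySem.List.pyGetD (PySem.List.pyGetD board y []) x (-7)

def is_color (x y color : Int) (board : List (List Int)) : Bool :=
  if pvCell board y x == color then true else false

def get_neighbors (x y color : Int) (board : List (List Int)) : List (Int × Int) :=
  let neighbors : List (Int × Int) := []
  -- Above
  let neighbors := if y > 0 then
    (if is_color x (y - 1) color board then neighbors ++ [(x, y - 1)] else neighbors) else neighbors
  -- Below
  let neighbors := if y < 4 - 1 then
    (if is_color x (y + 1) color board then neighbors ++ [(x, y + 1)] else neighbors) else neighbors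
  -- Left
  let neighbors := if x > 0 then
    (if is_color (x - 1) y color board then neighbors ++ [(x - 1, y)] else neighbors) else neighbors
  -- Right
  let neighbors := if x < 3 - 1 then
    (if is_color (x + 1) y color board then neighbors ++ [(x + 1, y)] else neighbors) else neighbors
  neighbors

-- dfs_chain; the Nat fuel only makes the Python recursion total in Lean (64 is more than the
-- recursion depth ever reachable on inputs satisfying Pre_does_move_capture; fuel is a totality
-- guard, not part of the algorithm).  State is (chain, visited), exactly Python's two sets.
def dfsA (x y color : Int) (board : List (List Int)) :
    Nat → Int × Int → PySem.Set (Int × Int) × PySem.Set (Int × Int) →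
    PySem.Set (Int × Int) × PySem.Set (Int × Int)
  | 0, _, st => st
  | fuel + 1, n, st =>
    if (!(PySem.Set.contains st.2 n) && is_color n.1 n.2 color board) || (n.1 == x && n.2 == y) then
      let visited := PySem.Set.add st.2 n
      let chain := PySem.Set.add st.1 n
      (get_neighbors n.1 n.2 color board).foldl
        (fun st m => dfsA x y color board fuel m st) (chain, visited)
    else st

-- returns {"liberties": …, "chain": …}; the liberties loop iterates Python's chain set, but the
-- only consumer (does_move_capture) takes len(liberties), which does not depend on that order.
def get_chain_and_liberites (x y color : Int) (board : List (List Int)) :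
    PySem.Dict String (List (Int × Int)) :=
  let st := dfsA x y color board 64 (x, y) (PySem.Set.empty, PySem.Set.empty)
  let liberties : PySem.Set (Int × Int) :=
    st.1.foldl (fun lib c => PySem.Set.update lib (get_neighbors c.1 c.2 0 board)) PySem.Set.empty
  PySem.Dict.insert (PySem.Dict.insert PySem.Dict.empty "liberties" liberties) "chain" st.1

def does_move_capture (x : Int) (y : Int) (color : Int) (board : List (List Int)) : Bool :=
  let captures := false
  if color == 0 then false
  else
    let opposite_color : Int := if color == 1 then 2 else 1
    let oppositeNeighbors := get_neighbors x y opposite_color board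
    oppositeNeighbors.foldl (fun captures n =>
      if (PySem.Dict.getD (get_chain_and_liberites n.1 n.2 opposite_color board) "liberties" []).length == 1
      then true else captures) captures

-- ===== PORT B =====
-- Source B's nbrs_of: A-style bounds/colour guards (each a single 'and' condition)
def nbrs_of (a b col : Int) (board : List (List Int)) : List (Int × Int) :=
  let out : List (Int × Int) := []
  let out := if decide (b > 0) && (pvCell board (b - 1) a == col) then out ++ [(a, b - 1)] else out
  let out := if decide (b < 4 - 1) && (pvCell board (b + 1) a == col) then out ++ [(a, b + 1)] else out
  let out := if decide (a > 0) && (pvCell board b (a - 1) == col) then out ++ [(a - 1, b)] else out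
  let out := if decide (a < 3 - 1) && (pvCell board b (a + 1) == col) then out ++ [(a + 1, b)] else out
  out

-- one saturation round: chain |= set(nbrs_of(c)) for every chain stone c (snapshot iteration)
def chainRound (opp : Int) (board : List (List Int)) (chain : PySem.Set (Int × Int)) :
    PySem.Set (Int × Int) :=
  chain.foldl (fun acc c => PySem.Set.union acc (PySem.Set.ofList (nbrs_of c.1 c.2 opp board)))
    chain

def chainOf (opp : Int) (board : List (List Int)) (sx sy : Int) : PySem.Set (Int × Int) :=
  (List.range 12).foldl (fun ch _ => chainRound opp board ch)
    (PySem.Set.add PySem.Set.empty (sx, sy))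

-- the liberty set comprehension
def libsOf (opp : Int) (board : List (List Int)) (chain : PySem.Set (Int × Int)) :
    PySem.Set (Int × Int) :=
  chain.foldl (fun acc c => (nbrs_of c.1 c.2 0 board).foldl PySem.Set.add acc) PySem.Set.empty

def does_move_capture_alt (x : Int) (y : Int) (color : Int) (board : List (List Int)) : Bool :=
  if color == 0 then false
  else
    let opp : Int := if color == 1 then 2 else 1
    (nbrs_of x y opp board).any (fun s =>
      (libsOf opp board (chainOf opp board s.1 s.2)).length == 1)

-- ===== PRECONDITION & SPEC =====
-- Pre_ admits (1) every color-0 input (A returns False before touching the board); (2) on-grid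
-- moves on boards carrying the 4 rows × 3 columns that the module's hard-coded rows/cols
-- constants make A read (elsewhere A raises IndexError); (3) inputs whose four guarded
-- neighbour reads all succeed in Python and carry no opposite-colour stone, so A returns False
-- at once.  Excluded are the remaining inputs, where A either raises IndexError or returns a
-- value that depends on Python's accidental negative-index wraparound against the 3×4 grid.
def Pre_does_move_capture (x : Int) (y : Int) (color : Int) (board : List (List Int)) : Prop :=
  color = 0 ∨
    (0 ≤ x ∧ x < 3 ∧ 0 ≤ y ∧ y < 4 ∧ 4 ≤ board.length ∧ ∀ r ∈ board.take 4, 3 ≤ r.length) ∨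
    ((y > 0 → PySem.Raise.InRange board.length (y - 1) ∧
        PySem.Raise.InRange (PySem.List.pyGetD board (y - 1) []).length x ∧
        pvCell board (y - 1) x ≠ (if color = 1 then 2 else 1)) ∧
      (y < 4 - 1 → PySem.Raise.InRange board.length (y + 1) ∧
        PySem.Raise.InRange (PySem.List.pyGetD board (y + 1) []).length x ∧
        pvCell board (y + 1) x ≠ (if color = 1 then 2 else 1)) ∧
      (x > 0 → PySem.Raise.InRange board.length y ∧
        PySem.Raise.InRange (PySem.List.pyGetD board y []).length (x - 1) ∧
        pvCell board y (x - 1) ≠ (if color = 1 then 2 else 1)) ∧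
      (x < 3 - 1 → PySem.Raise.InRange board.length y ∧
        PySem.Raise.InRange (PySem.List.pyGetD board y []).length (x + 1) ∧
        pvCell board y (x + 1) ≠ (if color = 1 then 2 else 1)))
instance (x : Int) (y : Int) (color : Int) (board : List (List Int)) : Decidable (Pre_does_move_capture x y color board) := by unfold Pre_does_move_capture PySem.Raise.InRange; infer_instance

def pvWitness_does_move_capture : Int × Int × Int × List (List Int) :=
  (0, 1, 1, [[2, 1, 0], [0, 0, 0], [0, 0, 0], [0, 0, 0]])

def Spec_does_move_capture (x : Int) (y : Int) (color : Int) (board : List (List Int)) (out : Bool) : Prop := out = does_move_capture_alt x y color board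
instance (x : Int) (y : Int) (color : Int) (board : List (List Int)) (out : Bool) : Decidable (Spec_does_move_capture x y color board out) := by unfold Spec_does_move_capture; infer_instance

-- ===== CLAIM (what is proved, stated in full; the proofs are below) =====
def Claim_equal_does_move_capture : Prop := ∀ (x : Int) (y : Int) (color : Int) (board : List (List Int)), Dom_does_move_capture x y color board → Pre_does_move_capture x y color board → Spec_does_move_capture x y color board (does_move_capture x y color board)

-- ===== LEMMAS AND PROOFS =====

-- ---- basic notions used by the proofs ----

def pvInb (a b : Int) : Bool := decide (0 ≤ a) && decide (a < 3) && decide (0 ≤ b) && decide (b < 4)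

def pvNbrs (a b : Int) : List (Int × Int) := [(a, b - 1), (a, b + 1), (a - 1, b), (a + 1, b)]

def pvWin (c : Int × Int) : Prop := pvInb c.1 c.2 = true

-- the in-bounds neighbours of c carrying colour col (B's filter; A's get_neighbors equals it
-- whenever c itself is inside the 3×4 window)
def pvNbrsF (col : Int) (board : List (List Int)) (c : Int × Int) : List (Int × Int) :=
  (pvNbrs c.1 c.2).filter (fun m => pvInb m.1 m.2 && (pvCell board m.2 m.1 == col))

def pvReach (opp : Int) (board : List (List Int)) (s c : Int × Int) : Prop :=
  Relation.ReflTransGen (fun a b => b ∈ pvNbrsF opp board a) s c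

def pvWindowCells : List (Int × Int) :=
  [(0,0),(1,0),(2,0),(0,1),(1,1),(2,1),(0,2),(1,2),(2,2),(0,3),(1,3),(2,3)]

def pvU (v : List (Int × Int)) : Nat :=
  (pvWindowCells.filter (fun c => decide (c ∉ v))).length

lemma pvInb_iff (a b : Int) : pvInb a b = true ↔ 0 ≤ a ∧ a < 3 ∧ 0 ≤ b ∧ b < 4 := by
  simp [pvInb]; tauto

lemma mem_pvWindowCells (c : Int × Int) : c ∈ pvWindowCells ↔ pvWin c := by
  obtain ⟨a, b⟩ := c
  simp [pvWindowCells, pvWin, pvInb_iff, Prod.ext_iff]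
  omega

lemma mem_pvNbrsF (col : Int) (board : List (List Int)) (c m : Int × Int) :
    m ∈ pvNbrsF col board c ↔
      m ∈ pvNbrs c.1 c.2 ∧ pvInb m.1 m.2 = true ∧ pvCell board m.2 m.1 = col := by
  simp [pvNbrsF, List.mem_filter, beq_iff_eq]

lemma pvWin_of_mem_nbrsF {col : Int} {board : List (List Int)} {c m : Int × Int}
    (h : m ∈ pvNbrsF col board c) : pvWin m :=
  ((mem_pvNbrsF col board c m).1 h).2.1

lemma self_not_mem_pvNbrsF (col : Int) (board : List (List Int)) (c : Int × Int) :
    c ∉ pvNbrsF col board c := by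
  intro h
  have := ((mem_pvNbrsF col board c c).1 h).1
  obtain ⟨a, b⟩ := c
  simp [pvNbrs, Prod.ext_iff] at this
  omega

lemma is_color_eq (a b col : Int) (board : List (List Int)) :
    is_color a b col board = (pvCell board b a == col) := by
  unfold is_color
  by_cases h : (pvCell board b a == col) = true <;> simp [h]

-- A's neighbour function coincides with B's filter on window cells
lemma append_seg {α : Type} (g : Prop) [Decidable g] (c : Bool) (l : List α) (m : α) :
    (if g then (if c then l ++ [m] else l) else l) = l ++ (if g ∧ c = true then [m] else []) := by
  split_ifs <;> simp_all

lemma filter4 {α : Type} (p : α → Bool) (m1 m2 m3 m4 : α) :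
    List.filter p [m1, m2, m3, m4] =
      (if p m1 = true then [m1] else []) ++ ((if p m2 = true then [m2] else []) ++
        ((if p m3 = true then [m3] else []) ++ (if p m4 = true then [m4] else []))) := by
  simp only [List.filter_cons, List.filter_nil]
  split_ifs <;> simp

lemma nbrs_eq (a b col : Int) (board : List (List Int)) (h : pvInb a b = true) :
    get_neighbors a b col board = pvNbrsF col board (a, b) := by
  obtain ⟨h1, h2, h3, h4⟩ := (pvInb_iff a b).1 h
  have e1 : (pvInb a (b - 1) = true) ↔ b > 0 := by simp [pvInb_iff]; omega
  have e2 : (pvInb a (b + 1) = true) ↔ b < 4 - 1 := by simp [pvInb_iff]; omega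
  have e3 : (pvInb (a - 1) b = true) ↔ a > 0 := by simp [pvInb_iff]; omega
  have e4 : (pvInb (a + 1) b = true) ↔ a < 3 - 1 := by simp [pvInb_iff]; omega
  have c1 : (b > 0 ∧ (pvCell board (b - 1) a == col) = true) ↔
      ((pvInb a (b - 1) && (pvCell board (b - 1) a == col)) = true) := by
    rw [Bool.and_eq_true]; exact and_congr_left' e1.symm
  have c2 : (b < 4 - 1 ∧ (pvCell board (b + 1) a == col) = true) ↔
      ((pvInb a (b + 1) && (pvCell board (b + 1) a == col)) = true) := by
    rw [Bool.and_eq_true]; exact and_congr_left' e2.symm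
  have c3 : (a > 0 ∧ (pvCell board b (a - 1) == col) = true) ↔
      ((pvInb (a - 1) b && (pvCell board b (a - 1) == col)) = true) := by
    rw [Bool.and_eq_true]; exact and_congr_left' e3.symm
  have c4 : (a < 3 - 1 ∧ (pvCell board b (a + 1) == col) = true) ↔
      ((pvInb (a + 1) b && (pvCell board b (a + 1) == col)) = true) := by
    rw [Bool.and_eq_true]; exact and_congr_left' e4.symm
  unfold get_neighbors pvNbrsF pvNbrs
  simp only [is_color_eq]
  simp only [append_seg]
  rw [filter4]
  simp only [List.nil_append, List.append_assoc]
  rw [if_congr c1 rfl rfl, if_congr c2 rfl rfl, if_congr c3 rfl rfl, if_congr c4 rfl rfl]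

lemma append_seg2 {α : Type} (g : Prop) [Decidable g] (c : Bool) (l : List α) (m : α) :
    (if decide g && c then l ++ [m] else l) = l ++ (if g ∧ c = true then [m] else []) := by
  split_ifs <;> simp_all

lemma nbrsOf_eq_get (a b col : Int) (board : List (List Int)) :
    nbrs_of a b col board = get_neighbors a b col board := by
  unfold nbrs_of get_neighbors
  simp only [is_color_eq, append_seg, append_seg2]

-- ---- counting unvisited window cells ----

lemma countP_lt {α : Type} (l : List α) (p q : α → Bool)
    (himp : ∀ a, q a = true → p a = true) (a : α) (hal : a ∈ l)
    (hpa : p a = true) (hqa : q a = false) : l.countP q < l.countP p := by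
  induction l with
  | nil => cases hal
  | cons b rest ih =>
    rw [List.countP_cons, List.countP_cons]
    rcases List.mem_cons.1 hal with rfl | hmem
    · have hmono : rest.countP q ≤ rest.countP p :=
        List.countP_mono_left (fun x _ hq => himp x hq)
      simp [hpa, hqa]
      omega
    · have hstep : (if q b = true then 1 else 0) ≤ (if p b = true then 1 else 0) := by
        by_cases hqb : q b = true
        · simp [hqb, himp b hqb]
        · simp [hqb]
      have := ih hmem
      omega

lemma pvU_le_of_subset {v w : List (Int × Int)} (h : v ⊆ w) : pvU w ≤ pvU v := by
  unfold pvU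
  simp only [← List.countP_eq_length_filter]
  exact List.countP_mono_left (fun c _ hc => by
    simp only [decide_eq_true_eq] at *
    exact fun hv => hc (h hv))

lemma pvU_add_lt {v : List (Int × Int)} {n : Int × Int} (hw : pvWin n) (hn : n ∉ v) :
    pvU (PySem.Set.add v n) < pvU v := by
  rw [PySem.Set.add_of_not_mem hn]
  unfold pvU
  simp only [← List.countP_eq_length_filter]
  refine countP_lt _ _ _ ?_ n ((mem_pvWindowCells n).2 hw) ?_ ?_
  · intro c hc
    simp only [decide_eq_true_eq] at hc ⊢
    intro hcv
    exact hc (List.mem_append_left _ hcv)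
  · simpa using hn
  · simp

lemma pvU_pos {v : List (Int × Int)} {n : Int × Int} (hw : pvWin n) (hn : n ∉ v) :
    0 < pvU v := by
  unfold pvU
  apply List.length_pos_of_mem (a := n)
  exact List.mem_filter.2 ⟨(mem_pvWindowCells n).2 hw, by simpa using hn⟩

-- ---- generic fold helpers ----

lemma foldl_inv {α σ : Type} (g : σ → α → σ) (Q : σ → Prop) :
    ∀ (l : List α) (init : σ), (∀ s a, a ∈ l → Q s → Q (g s a)) → Q init → Q (l.foldl g init) := by
  intro l
  induction l with
  | nil => intro init _ h; exact h
  | cons c rest ih =>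
    intro init hstep h
    exact ih _ (fun s a ha => hstep s a (List.mem_cons_of_mem _ ha)) (hstep init c List.mem_cons_self h)

lemma mem_foldl_add_id {α : Type} [BEq α] [LawfulBEq α] (l : List α) (s : PySem.Set α) (m : α) :
    m ∈ l.foldl PySem.Set.add s ↔ m ∈ s ∨ m ∈ l := by
  induction l generalizing s with
  | nil => simp
  | cons c rest ih => simp [ih, PySem.Set.mem_add, List.mem_cons]; tauto

lemma nodup_foldl_add {α : Type} [BEq α] [LawfulBEq α] (l : List α) (s : PySem.Set α)
    (h : s.Nodup) : (l.foldl PySem.Set.add s).Nodup := by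
  induction l generalizing s with
  | nil => exact h
  | cons c rest ih => exact ih _ (PySem.Set.nodup_add s c h)

lemma foldl_add_append {α : Type} [BEq α] [LawfulBEq α] (l : List α) (s : PySem.Set α) :
    ∃ t, l.foldl PySem.Set.add s = s ++ t := by
  induction l generalizing s with
  | nil => exact ⟨[], by simp⟩
  | cons c rest ih =>
    rcases ih (PySem.Set.add s c) with ⟨t, ht⟩
    rw [List.foldl_cons]
    by_cases hc : c ∈ s
    · rw [PySem.Set.add_of_mem hc] at ht
      exact ⟨t, by rw [PySem.Set.add_of_mem hc]; exact ht⟩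
    · rw [PySem.Set.add_of_not_mem hc, List.append_assoc] at ht
      exact ⟨[c] ++ t, by rw [PySem.Set.add_of_not_mem hc]; simpa using ht⟩

-- membership in the nested neighbour-collecting fold (B's chainRound / libsOf shape)
lemma mem_foldl_collect (g : Int × Int → List (Int × Int)) :
    ∀ (l : List (Int × Int)) (s : PySem.Set (Int × Int)) (m : Int × Int),
      m ∈ l.foldl (fun acc c => (g c).foldl PySem.Set.add acc) s ↔ m ∈ s ∨ ∃ c ∈ l, m ∈ g c := by
  intro l
  induction l with
  | nil => simp
  | cons c rest ih =>
    intro s m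
    simp [List.foldl_cons, ih, mem_foldl_add_id]
    tauto

lemma nodup_foldl_collect (g : Int × Int → List (Int × Int)) (l : List (Int × Int))
    (s : PySem.Set (Int × Int)) (h : s.Nodup) :
    (l.foldl (fun acc c => (g c).foldl PySem.Set.add acc) s).Nodup := by
  induction l generalizing s with
  | nil => exact h
  | cons c rest ih => exact ih _ (nodup_foldl_add _ _ h)

lemma foldl_collect_append (g : Int × Int → List (Int × Int)) (l : List (Int × Int))
    (s : PySem.Set (Int × Int)) :
    ∃ t, l.foldl (fun acc c => (g c).foldl PySem.Set.add acc) s = s ++ t := by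
  induction l generalizing s with
  | nil => exact ⟨[], by simp⟩
  | cons c rest ih =>
    rcases foldl_add_append (g c) s with ⟨t1, ht1⟩
    rcases ih ((g c).foldl PySem.Set.add s) with ⟨t2, ht2⟩
    refine ⟨t1 ++ t2, ?_⟩
    rw [List.foldl_cons]
    show List.foldl _ ((g c).foldl PySem.Set.add s) rest = _
    rw [ht2, ht1, List.append_assoc]

lemma mem_foldl_update (g : Int × Int → List (Int × Int)) :
    ∀ (l : List (Int × Int)) (s : PySem.Set (Int × Int)) (m : Int × Int),
      m ∈ l.foldl (fun acc c => PySem.Set.update acc (g c)) s ↔ m ∈ s ∨ ∃ c ∈ l, m ∈ g c := by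
  intro l
  induction l with
  | nil => simp
  | cons c rest ih =>
    intro s m
    simp [List.foldl_cons, ih, PySem.Set.mem_update]
    tauto

lemma nodup_foldl_update (g : Int × Int → List (Int × Int)) (l : List (Int × Int))
    (s : PySem.Set (Int × Int)) (h : s.Nodup) :
    (l.foldl (fun acc c => PySem.Set.update acc (g c)) s).Nodup := by
  induction l generalizing s with
  | nil => exact h
  | cons c rest ih => exact ih _ (PySem.Set.nodup_update s (g c) h)

lemma foldl_flag_or (q : Int × Int → Bool) :
    ∀ (l : List (Int × Int)) (a : Bool),
      l.foldl (fun cap n => if q n then true else cap) a = (a || l.any q) := by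
  intro l
  induction l with
  | nil => simp
  | cons c rest ih =>
    intro a
    rw [List.foldl_cons, List.any_cons]
    by_cases h : q c = true
    · show List.foldl _ (if q c = true then true else a) rest = _
      rw [if_pos h, ih, h]
      simp
    · show List.foldl _ (if q c = true then true else a) rest = _
      rw [if_neg h, ih]
      have : q c = false := by simpa using h
      simp [this]

-- ---- B's saturation rounds compute exactly the reachable set ----

lemma chainRound_eq_win (opp : Int) (board : List (List Int)) (ch : PySem.Set (Int × Int))
    (hw : ∀ c ∈ ch, pvWin c) :
    chainRound opp board ch =
      ch.foldl (fun acc c => (pvNbrsF opp board c).foldl PySem.Set.add acc) ch := by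
  unfold chainRound
  apply PySem.List.foldl_congr_mem
  intro acc c hc
  show PySem.Set.update acc (PySem.Set.ofList (nbrs_of c.1 c.2 opp board)) = _
  rw [nbrsOf_eq_get, nbrs_eq c.1 c.2 opp board (hw c hc)]
  show (PySem.Set.ofList (pvNbrsF opp board (c.1, c.2))).foldl PySem.Set.add acc = _
  rw [PySem.Set.ofList_eq_self_of_nodup]
  exact (List.Nodup.filter _ (by
    obtain ⟨a, b⟩ := c
    simp [pvNbrs, Prod.ext_iff]
    omega))

lemma mem_chainRound (opp : Int) (board : List (List Int)) (ch : PySem.Set (Int × Int))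
    (hw : ∀ c ∈ ch, pvWin c) (m : Int × Int) :
    m ∈ chainRound opp board ch ↔ m ∈ ch ∨ ∃ c ∈ ch, m ∈ pvNbrsF opp board c := by
  rw [chainRound_eq_win opp board ch hw]; exact mem_foldl_collect _ ch ch m

lemma subset_chainRound (opp : Int) (board : List (List Int)) (ch : PySem.Set (Int × Int))
    (hw : ∀ c ∈ ch, pvWin c) :
    ch ⊆ chainRound opp board ch :=
  fun m hm => (mem_chainRound opp board ch hw m).2 (Or.inl hm)

lemma chainRound_append (opp : Int) (board : List (List Int)) (ch : PySem.Set (Int × Int))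
    (hw : ∀ c ∈ ch, pvWin c) :
    ∃ t, chainRound opp board ch = ch ++ t := by
  rw [chainRound_eq_win opp board ch hw]; exact foldl_collect_append _ ch ch

lemma nodup_chainRound (opp : Int) (board : List (List Int)) (ch : PySem.Set (Int × Int))
    (hw : ∀ c ∈ ch, pvWin c) (h : ch.Nodup) : (chainRound opp board ch).Nodup := by
  rw [chainRound_eq_win opp board ch hw]; exact nodup_foldl_collect _ ch ch h

lemma closed_of_fix {opp : Int} {board : List (List Int)} {ch : PySem.Set (Int × Int)}
    (hw : ∀ c ∈ ch, pvWin c)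
    (hfix : chainRound opp board ch = ch) {c m : Int × Int} (hc : c ∈ ch)
    (hm : m ∈ pvNbrsF opp board c) : m ∈ ch := by
  have : m ∈ chainRound opp board ch := (mem_chainRound opp board ch hw m).2 (Or.inr ⟨c, hc, hm⟩)
  rwa [hfix] at this

lemma foldl_range_iterate {σ : Type} (f : σ → σ) :
    ∀ (k : Nat) (init : σ), (List.range k).foldl (fun s _ => f s) init = f^[k] init := by
  intro k
  induction k with
  | zero => intro init; rfl
  | succ n ih =>
    intro init
    rw [List.range_succ, List.foldl_append, ih, Function.iterate_succ_apply']
    rfl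

lemma chainOf_eq_iterate (opp : Int) (board : List (List Int)) (sx sy : Int) :
    chainOf opp board sx sy = (chainRound opp board)^[12] [(sx, sy)] := by
  unfold chainOf
  rw [foldl_range_iterate]
  rfl

-- invariants along the iteration
lemma chainOf_inv (opp : Int) (board : List (List Int)) (sx sy : Int) (hw : pvWin (sx, sy)) :
    ∀ k : Nat,
      ((chainRound opp board)^[k] [(sx, sy)]).Nodup ∧
      (∀ c ∈ (chainRound opp board)^[k] [(sx, sy)], pvWin c) ∧
      (∀ c ∈ (chainRound opp board)^[k] [(sx, sy)], pvReach opp board (sx, sy) c) ∧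
      (sx, sy) ∈ (chainRound opp board)^[k] [(sx, sy)] := by
  intro k
  induction k with
  | zero =>
    refine ⟨by simp, ?_, ?_, by simp⟩
    · intro c hc; simp at hc; subst hc; exact hw
    · intro c hc; simp at hc; subst hc; exact Relation.ReflTransGen.refl
  | succ n ih =>
    obtain ⟨hnd, hwin, hreach, hs⟩ := ih
    rw [Function.iterate_succ_apply']
    refine ⟨nodup_chainRound _ _ _ hwin hnd, ?_, ?_, subset_chainRound _ _ _ hwin hs⟩
    · intro c hc
      rcases (mem_chainRound _ _ _ hwin _).1 hc with h | ⟨d, _, hd⟩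
      · exact hwin c h
      · exact pvWin_of_mem_nbrsF hd
    · intro c hc
      rcases (mem_chainRound _ _ _ hwin _).1 hc with h | ⟨d, hdm, hd⟩
      · exact hreach c h
      · exact Relation.ReflTransGen.tail (hreach d hdm) hd

lemma len_le_12 (l : List (Int × Int)) (hnd : l.Nodup) (hwin : ∀ c ∈ l, pvWin c) :
    l.length ≤ 12 := by
  have h1 : l.toFinset.card = l.length := List.toFinset_card_of_nodup hnd
  have h2 : l.toFinset ⊆ pvWindowCells.toFinset := by
    intro c hc
    rw [List.mem_toFinset] at *
    exact (mem_pvWindowCells c).2 (hwin c hc)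
  have h3 := Finset.card_le_card h2
  have h4 : pvWindowCells.toFinset.card ≤ 12 :=
    le_trans (List.toFinset_card_le _) (by norm_num [pvWindowCells])
  omega

lemma iterate_progress (opp : Int) (board : List (List Int)) (s0 : PySem.Set (Int × Int))
    (hwin : ∀ k : Nat, ∀ c ∈ (chainRound opp board)^[k] s0, pvWin c) :
    ∀ k : Nat,
      (chainRound opp board)^[k + 1] s0 = (chainRound opp board)^[k] s0 ∨
      k + s0.length ≤ ((chainRound opp board)^[k] s0).length := by
  intro k
  induction k with
  | zero => right; simp
  | succ n ih =>
    rcases ih with h | h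
    · left
      calc (chainRound opp board)^[n + 1 + 1] s0
          = chainRound opp board ((chainRound opp board)^[n + 1] s0) :=
            Function.iterate_succ_apply' _ _ _
        _ = chainRound opp board ((chainRound opp board)^[n] s0) := by rw [h]
        _ = (chainRound opp board)^[n + 1] s0 := (Function.iterate_succ_apply' _ _ _).symm
    · rcases chainRound_append opp board ((chainRound opp board)^[n] s0) (hwin n) with ⟨t, ht⟩
      cases t with
      | nil =>
        left
        have hfix : chainRound opp board ((chainRound opp board)^[n] s0) =
            (chainRound opp board)^[n] s0 := by simpa using ht
        calc (chainRound opp board)^[n + 1 + 1] s0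
            = chainRound opp board ((chainRound opp board)^[n + 1] s0) :=
              Function.iterate_succ_apply' _ _ _
          _ = chainRound opp board (chainRound opp board ((chainRound opp board)^[n] s0)) := by
              rw [Function.iterate_succ_apply' (chainRound opp board) n s0]
          _ = (chainRound opp board)^[n + 1] s0 := by
              rw [hfix, ← Function.iterate_succ_apply' (chainRound opp board) n s0]
      | cons a t' =>
        right
        have : (chainRound opp board)^[n + 1] s0 =
            (chainRound opp board)^[n] s0 ++ a :: t' := by
          rw [Function.iterate_succ_apply', ht]
        rw [this]
        simp
        omega

lemma chainOf_fix (opp : Int) (board : List (List Int)) (sx sy : Int) (hw : pvWin (sx, sy)) :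
    chainRound opp board (chainOf opp board sx sy) = chainOf opp board sx sy := by
  have hwin : ∀ k : Nat, ∀ c ∈ (chainRound opp board)^[k] [(sx, sy)], pvWin c :=
    fun k => (chainOf_inv opp board sx sy hw k).2.1
  rw [chainOf_eq_iterate]
  rcases iterate_progress opp board [(sx, sy)] hwin 12 with h | h
  · rw [← Function.iterate_succ_apply' (chainRound opp board) 12 [(sx, sy)]]; exact h
  · exfalso
    obtain ⟨hnd, hwin12, -, -⟩ := chainOf_inv opp board sx sy hw 12
    have := len_le_12 _ hnd hwin12
    simp only [List.length_cons, List.length_nil] at h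
    omega

lemma mem_chainOf (opp : Int) (board : List (List Int)) (sx sy : Int) (hw : pvWin (sx, sy))
    (m : Int × Int) : m ∈ chainOf opp board sx sy ↔ pvReach opp board (sx, sy) m := by
  constructor
  · intro hm
    obtain ⟨-, -, hreach, -⟩ := chainOf_inv opp board sx sy hw 12
    rw [chainOf_eq_iterate] at hm
    exact hreach m hm
  · intro hr
    induction hr with
    | refl =>
      obtain ⟨-, -, -, hs⟩ := chainOf_inv opp board sx sy hw 12
      rw [chainOf_eq_iterate]; exact hs
    | tail _ hedge ih =>
      exact closed_of_fix
        (by rw [chainOf_eq_iterate] at *; exact (chainOf_inv opp board sx sy hw 12).2.1)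
        (chainOf_fix opp board sx sy hw) ih hedge

-- ---- A's recursive DFS computes the same reachable set ----

-- the per-call contract of dfsA at a given fuel (what the fuel-induction proves)
def dfsGood (sx sy opp : Int) (board : List (List Int)) (f : Nat) : Prop :=
  ∀ (n : Int × Int) (st : PySem.Set (Int × Int) × PySem.Set (Int × Int)),
    pvWin (sx, sy) → pvWin n → (∀ c ∈ st.2, pvWin c) →
    (if n ∈ st.2 then (if n = (sx, sy) then 2 * pvU st.2 + 2 else 1) else 2 * pvU st.2 + 1) ≤ f →
    st.2 ⊆ (dfsA sx sy opp board f n st).2 ∧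
    ((¬ n ∈ st.2 ∧ is_color n.1 n.2 opp board = true) ∨ n = (sx, sy) →
      n ∈ (dfsA sx sy opp board f n st).2) ∧
    (∀ c ∈ (dfsA sx sy opp board f n st).2, pvWin c) ∧
    (∀ a ∈ (dfsA sx sy opp board f n st).2, a ∉ st.2 →
      ∀ m ∈ pvNbrsF opp board a, m ∈ (dfsA sx sy opp board f n st).2)

lemma guard_iff (sx sy : Int) (opp : Int) (board : List (List Int)) (n : Int × Int)
    (v : PySem.Set (Int × Int)) :
    ((!(PySem.Set.contains v n) && is_color n.1 n.2 opp board) || (n.1 == sx && n.2 == sy)) = true ↔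
      ((¬ n ∈ v ∧ is_color n.1 n.2 opp board = true) ∨ n = (sx, sy)) := by
  simp [Prod.ext_iff]

lemma dfs_fold_aux (sx sy opp : Int) (board : List (List Int)) (f : Nat)
    (IH : dfsGood sx sy opp board f) (hws : pvWin (sx, sy))
    (base : PySem.Set (Int × Int)) :
    ∀ (l : List (Int × Int)) (st : PySem.Set (Int × Int) × PySem.Set (Int × Int)),
      (∀ m ∈ l, pvWin m ∧ is_color m.1 m.2 opp board = true) →
      (∀ v : PySem.Set (Int × Int), base ⊆ v → ∀ m ∈ l,
        (if m ∈ v then (if m = (sx, sy) then 2 * pvU v + 2 else 1) else 2 * pvU v + 1) ≤ f) →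
      base ⊆ st.2 → (∀ c ∈ st.2, pvWin c) →
      (∀ a ∈ st.2, a ∉ base → ∀ m ∈ pvNbrsF opp board a, m ∈ st.2) →
      st.2 ⊆ (l.foldl (fun st m => dfsA sx sy opp board f m st) st).2 ∧
      (∀ c ∈ (l.foldl (fun st m => dfsA sx sy opp board f m st) st).2, pvWin c) ∧
      (∀ a ∈ (l.foldl (fun st m => dfsA sx sy opp board f m st) st).2, a ∉ base →
        ∀ m ∈ pvNbrsF opp board a, m ∈ (l.foldl (fun st m => dfsA sx sy opp board f m st) st).2) ∧
      (∀ m ∈ l, m ∈ (l.foldl (fun st m => dfsA sx sy opp board f m st) st).2) := by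
  intro l
  induction l with
  | nil =>
    intro st _ _ _ hw hcl
    exact ⟨fun c hc => hc, hw, hcl, by simp⟩
  | cons c rest ih =>
    intro st hmem hbud hb hw hcl
    obtain ⟨hwc, hcol⟩ := hmem c (List.mem_cons_self)
    obtain ⟨hA1, hA2, hA3, hA4⟩ :=
      IH c st hws hwc hw (hbud st.2 hb c (List.mem_cons_self))
    have hcr1 : c ∈ (dfsA sx sy opp board f c st).2 := by
      by_cases hcv : c ∈ st.2
      · exact hA1 hcv
      · exact hA2 (Or.inl ⟨hcv, hcol⟩)
    have hbr1 : base ⊆ (dfsA sx sy opp board f c st).2 := fun z hz => hA1 (hb hz)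
    have hclr1 : ∀ a ∈ (dfsA sx sy opp board f c st).2, a ∉ base →
        ∀ m ∈ pvNbrsF opp board a, m ∈ (dfsA sx sy opp board f c st).2 := by
      intro a ha hab m hm
      by_cases hast : a ∈ st.2
      · exact hA1 (hcl a hast hab m hm)
      · exact hA4 a ha hast m hm
    obtain ⟨hR1, hR2, hR3, hR4⟩ := ih (dfsA sx sy opp board f c st)
      (fun m hm => hmem m (List.mem_cons_of_mem _ hm))
      (fun v hv m hm => hbud v hv m (List.mem_cons_of_mem _ hm)) hbr1 hA3 hclr1
    rw [List.foldl_cons]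
    refine ⟨fun z hz => hR1 (hA1 hz), hR2, hR3, ?_⟩
    intro m hm
    rcases List.mem_cons.1 hm with rfl | hm'
    · exact hR1 hcr1
    · exact hR4 m hm'

lemma dfs_complete (sx sy opp : Int) (board : List (List Int)) :
    ∀ f : Nat, dfsGood sx sy opp board f := by
  intro f
  induction f with
  | zero =>
    intro n st hws hwn hwst hfuel
    exfalso
    split_ifs at hfuel <;> omega
  | succ f ihf =>
    intro n st hws hwn hwst hfuel
    simp only [dfsA]
    split
    case isFalse hg =>
      refine ⟨fun z hz => hz, ?_, hwst, ?_⟩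
      · intro hgp
        exact absurd ((guard_iff sx sy opp board n st.2).2 hgp) hg
      · intro a ha hnot m hm
        exact absurd ha hnot
    case isTrue hg =>
      have hgp := (guard_iff sx sy opp board n st.2).1 hg
      have hL : get_neighbors n.1 n.2 opp board = pvNbrsF opp board n :=
        nbrs_eq n.1 n.2 opp board hwn
      have hwbase : ∀ c ∈ PySem.Set.add st.2 n, pvWin c := by
        intro cc hcc
        rcases (PySem.Set.mem_add _ _ _).1 hcc with h | h
        · exact hwst cc h
        · rw [h]; exact hwn
      have hmemL : ∀ m ∈ get_neighbors n.1 n.2 opp board,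
          pvWin m ∧ is_color m.1 m.2 opp board = true := by
        intro m hm
        rw [hL] at hm
        refine ⟨pvWin_of_mem_nbrsF hm, ?_⟩
        rw [is_color_eq]
        have := ((mem_pvNbrsF opp board n m).1 hm).2.2
        simp [this]
      have hbud : ∀ v : PySem.Set (Int × Int), (PySem.Set.add st.2 n) ⊆ v →
          ∀ m ∈ get_neighbors n.1 n.2 opp board,
          (if m ∈ v then (if m = (sx, sy) then 2 * pvU v + 2 else 1) else 2 * pvU v + 1) ≤ f := by
        intro v hv m hm
        by_cases hn : n ∈ st.2
        · have hns : n = (sx, sy) := by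
            rcases hgp with ⟨hfresh, -⟩ | h
            · exact absurd hn hfresh
            · exact h
          have hfuel' : 2 * pvU st.2 + 2 ≤ f + 1 := by
            rw [if_pos hn, if_pos hns] at hfuel; exact hfuel
          have hsub : st.2 ⊆ v := fun z hz => hv ((PySem.Set.mem_add _ _ _).2 (Or.inl hz))
          have hUv : pvU v ≤ pvU st.2 := pvU_le_of_subset hsub
          have hms : m ≠ (sx, sy) := by
            rw [hL] at hm
            intro hcontr
            rw [hcontr, ← hns] at hm
            exact self_not_mem_pvNbrsF opp board n hm
          by_cases h1 : m ∈ v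
          · rw [if_pos h1, if_neg hms]; omega
          · rw [if_neg h1]; omega
        · have hfuel' : 2 * pvU st.2 + 1 ≤ f + 1 := by
            rw [if_neg hn] at hfuel; exact hfuel
          have hUlt : pvU (PySem.Set.add st.2 n) < pvU st.2 := pvU_add_lt hwn hn
          have hUv : pvU v ≤ pvU (PySem.Set.add st.2 n) := pvU_le_of_subset hv
          have hpos : 0 < pvU st.2 := pvU_pos hwn hn
          split_ifs <;> omega
      obtain ⟨hX1, hX2, hX3, hX4⟩ := dfs_fold_aux sx sy opp board f ihf hws
        (PySem.Set.add st.2 n) (get_neighbors n.1 n.2 opp board)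
        (PySem.Set.add st.1 n, PySem.Set.add st.2 n) hmemL hbud (fun z hz => hz) hwbase
        (fun a ha hna => absurd ha hna)
      refine ⟨?_, ?_, hX2, ?_⟩
      · exact fun z hz => hX1 ((PySem.Set.mem_add _ _ _).2 (Or.inl hz))
      · intro _
        exact hX1 ((PySem.Set.mem_add _ _ _).2 (Or.inr rfl))
      · intro a ha hnast m hm
        by_cases han : a = n
        · rw [han, ← hL] at hm
          exact hX4 m hm
        · have hnab : a ∉ PySem.Set.add st.2 n := by
            intro hc
            rcases (PySem.Set.mem_add _ _ _).1 hc with h | h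
            · exact hnast h
            · exact han h
          exact hX3 a ha hnab m hm

lemma dfs_sound (sx sy opp : Int) (board : List (List Int)) :
    ∀ (f : Nat) (n : Int × Int) (st : PySem.Set (Int × Int) × PySem.Set (Int × Int)),
      pvWin n → (∀ c ∈ st.2, pvWin c ∧ pvReach opp board (sx, sy) c) →
      pvReach opp board (sx, sy) n →
      ∀ c ∈ (dfsA sx sy opp board f n st).2, pvWin c ∧ pvReach opp board (sx, sy) c := by
  intro f
  induction f with
  | zero => intro n st _ hst _; simpa [dfsA] using hst
  | succ f ih =>
    intro n st hwn hst hrn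
    simp only [dfsA]
    split
    case isTrue hg =>
      apply foldl_inv _
        (fun st' : PySem.Set (Int × Int) × PySem.Set (Int × Int) =>
          ∀ c ∈ st'.2, pvWin c ∧ pvReach opp board (sx, sy) c)
      · intro s m hm hq
        have hmem : m ∈ pvNbrsF opp board n := by
          rw [← nbrs_eq n.1 n.2 opp board hwn]; exact hm
        exact ih m s (pvWin_of_mem_nbrsF hmem) hq (Relation.ReflTransGen.tail hrn hmem)
      · intro c hc
        rcases (PySem.Set.mem_add _ _ _).1 hc with h | h
        · exact hst c h
        · rw [h]; exact ⟨hwn, hrn⟩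
    case isFalse hg => exact hst

lemma dfs_fst_eq_snd (sx sy opp : Int) (board : List (List Int)) :
    ∀ (f : Nat) (n : Int × Int) (st : PySem.Set (Int × Int) × PySem.Set (Int × Int)),
      st.1 = st.2 → (dfsA sx sy opp board f n st).1 = (dfsA sx sy opp board f n st).2 := by
  intro f
  induction f with
  | zero => intro n st h; simpa [dfsA] using h
  | succ f ih =>
    intro n st h
    simp only [dfsA]
    split
    · apply foldl_inv _
        (fun st' : PySem.Set (Int × Int) × PySem.Set (Int × Int) => st'.1 = st'.2)
      · intro s a _ hq; exact ih a s hq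
      · show (PySem.Set.add st.1 n) = (PySem.Set.add st.2 n)
        rw [h]
    · exact h

-- the chain computed by A's DFS is exactly the reachable set
lemma chainA_char (sx sy opp : Int) (board : List (List Int)) (hw : pvWin (sx, sy)) :
    ∀ m, m ∈ (dfsA sx sy opp board 64 (sx, sy) (PySem.Set.empty, PySem.Set.empty)).1 ↔
      pvReach opp board (sx, sy) m := by
  intro m
  rw [dfs_fst_eq_snd sx sy opp board 64 (sx, sy) (PySem.Set.empty, PySem.Set.empty) rfl]
  constructor
  · intro hm
    exact (dfs_sound sx sy opp board 64 (sx, sy) _ hw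
      (by simp [PySem.Set.empty]) Relation.ReflTransGen.refl m hm).2
  · intro hr
    have hU : pvU (PySem.Set.empty : PySem.Set (Int × Int)) = 12 := by decide
    have hfuel : (if (sx, sy) ∈ ((PySem.Set.empty : PySem.Set (Int × Int)) : List (Int × Int)) then
        (if ((sx : Int), (sy : Int)) = (sx, sy) then 2 * pvU (PySem.Set.empty : PySem.Set (Int × Int)) + 2 else 1)
        else 2 * pvU (PySem.Set.empty : PySem.Set (Int × Int)) + 1) ≤ 64 := by
      rw [if_neg (by simp [PySem.Set.empty]), hU]
      omega
    obtain ⟨h1, h2, h3, h4⟩ := dfs_complete sx sy opp board 64 (sx, sy)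
      (PySem.Set.empty, PySem.Set.empty) hw hw (by simp [PySem.Set.empty]) hfuel
    induction hr with
    | refl => exact h2 (Or.inr rfl)
    | tail hab hedge ih2 => exact h4 _ ih2 (by simp [PySem.Set.empty]) _ hedge

-- ---- liberties ----

lemma mem_libsOf (opp : Int) (board : List (List Int)) (ch : PySem.Set (Int × Int))
    (m : Int × Int) : m ∈ libsOf opp board ch ↔ ∃ c ∈ ch, m ∈ nbrs_of c.1 c.2 0 board := by
  unfold libsOf
  rw [mem_foldl_collect]
  simp [PySem.Set.empty]

lemma nodup_libsOf (opp : Int) (board : List (List Int)) (ch : PySem.Set (Int × Int)) :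
    (libsOf opp board ch).Nodup := by
  unfold libsOf
  exact nodup_foldl_collect _ _ _ List.nodup_nil

lemma mem_libA (board : List (List Int)) (ch : List (Int × Int)) (m : Int × Int) :
    m ∈ ch.foldl (fun lib c => PySem.Set.update lib (get_neighbors c.1 c.2 0 board))
        PySem.Set.empty ↔ ∃ c ∈ ch, m ∈ get_neighbors c.1 c.2 0 board := by
  rw [mem_foldl_update]
  simp [PySem.Set.empty]

lemma win_of_reach (opp : Int) (board : List (List Int)) {s c : Int × Int}
    (hs : pvWin s) (h : pvReach opp board s c) : pvWin c := by
  induction h with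
  | refl => exact hs
  | tail _ hedge _ => exact pvWin_of_mem_nbrsF hedge

lemma getD_liberties (lib ch : List (Int × Int)) :
    PySem.Dict.getD
      (PySem.Dict.insert (PySem.Dict.insert PySem.Dict.empty "liberties" lib) "chain" ch)
      "liberties" [] = lib := by
  rw [PySem.Dict.getD_insert, if_neg (by decide), PySem.Dict.getD_insert, if_pos rfl]

-- the per-neighbour capture condition is the same number in both ports
lemma cond_eq (opp : Int) (board : List (List Int)) (n : Int × Int) (hwn : pvWin n) :
    (PySem.Dict.getD (get_chain_and_liberites n.1 n.2 opp board) "liberties" []).length =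
      (libsOf opp board (chainOf opp board n.1 n.2)).length := by
  unfold get_chain_and_liberites
  rw [getD_liberties]
  apply List.Perm.length_eq
  rw [List.perm_ext_iff_of_nodup (nodup_foldl_update _ _ PySem.Set.empty List.nodup_nil) (nodup_libsOf _ _ _)]
  intro m
  rw [mem_libA, mem_libsOf]
  have hchar := chainA_char n.1 n.2 opp board hwn
  constructor
  · rintro ⟨c, hc, hm⟩
    have hreach := (hchar c).1 hc
    have hwc : pvWin c := win_of_reach opp board hwn hreach
    rw [← nbrsOf_eq_get c.1 c.2 0 board] at hm
    exact ⟨c, (mem_chainOf opp board n.1 n.2 hwn c).2 hreach, hm⟩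
  · rintro ⟨c, hc, hm⟩
    have hreach := (mem_chainOf opp board n.1 n.2 hwn c).1 hc
    rw [nbrsOf_eq_get] at hm
    exact ⟨c, (hchar c).2 hreach, hm⟩

lemma any_congr_mem (l : List (Int × Int)) (q1 q2 : Int × Int → Bool)
    (h : ∀ n ∈ l, q1 n = q2 n) : l.any q1 = l.any q2 := by
  induction l with
  | nil => rfl
  | cons c rest ih =>
    rw [List.any_cons, List.any_cons, ih (fun n hn => h n (List.mem_cons_of_mem _ hn)),
      h c List.mem_cons_self]

-- ---- the no-opposite-neighbour case: both ports return False ----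

lemma a_nbrs_nil (x y opp : Int) (board : List (List Int))
    (h1 : y > 0 → pvCell board (y - 1) x ≠ opp)
    (h2 : y < 4 - 1 → pvCell board (y + 1) x ≠ opp)
    (h3 : x > 0 → pvCell board y (x - 1) ≠ opp)
    (h4 : x < 3 - 1 → pvCell board y (x + 1) ≠ opp) :
    get_neighbors x y opp board = [] := by
  unfold get_neighbors
  simp only [is_color_eq, append_seg]
  simp
  exact ⟨fun h => h1 h, fun h => h2 (by omega), fun h => h3 h, fun h => h4 (by omega)⟩

-- ===== VERDICT (by name: the statement is the Claim_ definition above) =====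

set_option maxHeartbeats 1000000 in
theorem does_move_capture_spec : Claim_equal_does_move_capture := by
  intro x y color board _ hpre
  unfold Spec_does_move_capture
  unfold does_move_capture does_move_capture_alt
  by_cases hc : (color == 0) = true
  · rw [if_pos hc, if_pos hc]
  · rw [if_neg hc, if_neg hc]
    dsimp only
    rw [nbrsOf_eq_get, foldl_flag_or, Bool.false_or]
    rcases hpre with h0 | ⟨hx0, hx3, hy0, hy4, -, -⟩ | ⟨hs1, hs2, hs3, hs4⟩
    · exact absurd (by simp [h0]) hc
    · have hwxy : pvInb x y = true := (pvInb_iff x y).2 ⟨hx0, hx3, hy0, hy4⟩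
      apply any_congr_mem
      intro n hn
      rw [nbrs_eq x y _ board hwxy] at hn
      have hwn : pvWin n := pvWin_of_mem_nbrsF hn
      rw [cond_eq _ board n hwn]
    · have eB : (if (color == 1) = true then (2 : Int) else 1) =
          (if color = 1 then (2 : Int) else 1) := by
        by_cases h : color = 1 <;> simp [h]
      rw [eB]
      rw [a_nbrs_nil x y _ board (fun h => (hs1 h).2.2) (fun h => (hs2 h).2.2)
        (fun h => (hs3 h).2.2) (fun h => (hs4 h).2.2)]
      simp
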